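-- pv_equiv track=rewrite | github.com/augmentac/ff2api-external-integration-tool | src/backend/zero_cost_basic.py | _check_authentication_required
-- ===== SOURCE A (Python) =====
-- def _check_authentication_required(html_content: str) -> bool:
--     """Check if authentication is required"""
--     auth_indicators = [
--         'login',
--         'signin',
--         'authentication',
--         'unauthorized',
--         'access denied',
--         'please log in',
--         'login required'
--     ]
--
--     content_lower = html_content.lower()
--     return any(indicator in content_lower for indicator in auth_indicators)
-- ===== SOURCE B (Python) =====
-- AUTH_INDICATORS = (
--     'login',
--     'signin',
--     'authentication',
--     'unauthorized',
--     'access denied',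
--     'please log in',
--     'login required',
-- )
--
-- # Index the keywords by first character once, then make a single pass over the
-- # text: at each position only the keywords starting with that character are tried.
-- _BY_FIRST = {}
-- for _kw in AUTH_INDICATORS:
--     _BY_FIRST.setdefault(_kw[0], []).append(_kw)
--
--
-- def _check_authentication_required(html_content: str) -> bool:
--     """Check if authentication is required"""
--     text = html_content.lower()
--     for i, ch in enumerate(text):
--         for kw in _BY_FIRST.get(ch, ()):
--             if text.startswith(kw, i):
--                 return True
--     return False
-- ===== Notes on version B (the rewrite author's own statement) =====
-- stated objective: alternative
-- what changed: B builds a one-time dict indexing the keywords by first character, then makes a single left-to-right pass over the lowered text, trying at each position only the keywords whose first character matches, instead of A's one full substring scan per keyword.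
import Mathlib
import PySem

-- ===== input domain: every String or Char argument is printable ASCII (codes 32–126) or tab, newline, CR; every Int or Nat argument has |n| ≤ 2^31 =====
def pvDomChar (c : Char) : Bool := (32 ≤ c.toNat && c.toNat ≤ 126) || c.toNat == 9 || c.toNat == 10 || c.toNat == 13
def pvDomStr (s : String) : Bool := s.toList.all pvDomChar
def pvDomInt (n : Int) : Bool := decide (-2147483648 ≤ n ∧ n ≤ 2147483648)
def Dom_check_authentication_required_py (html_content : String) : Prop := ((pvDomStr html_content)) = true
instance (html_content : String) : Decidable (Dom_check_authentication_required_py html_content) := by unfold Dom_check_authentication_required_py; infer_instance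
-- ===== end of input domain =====

-- B indexes the keywords by first character in a dict and makes one pass over the lowered text (alternative, same cost).


-- ===== PORT A =====
def check_authentication_required_py (html_content : String) : Bool :=
  let auth_indicators : List String :=
    ["login", "signin", "authentication", "unauthorized",
     "access denied", "please log in", "login required"]
  let content_lower := PySem.Str.lower html_content
  auth_indicators.any (fun indicator => PySem.Str.isIn indicator content_lower)

-- ===== PORT B =====
def pvAuthKeywords : List String :=
  ["login", "signin", "authentication", "unauthorized",
   "access denied", "please log in", "login required"]

-- _BY_FIRST: for kw in AUTH_INDICATORS: by_first.setdefault(kw[0], []).append(kw)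
def pvByFirst : PySem.Dict Char (List String) :=
  pvAuthKeywords.foldl
    (fun d kw => d.modify (kw.toList.headD ' ') [] (· ++ [kw]))
    PySem.Dict.empty

-- for i, ch in enumerate(text): for kw in by_first.get(ch, ()): if text.startswith(kw, i): return True
-- (text.startswith(kw, i) is startswith on the suffix of text at i, here 'ch :: rest')
def pvScan (d : PySem.Dict Char (List String)) : List Char → Bool
  | [] => false
  | ch :: rest =>
    ((d.getD ch []).any fun kw => PySem.Chars.startswith (ch :: rest) kw.toList)
      || pvScan d rest

def check_authentication_required_py_alt (html_content : String) : Bool :=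
  pvScan pvByFirst (PySem.Str.lower html_content).toList

-- ===== PRECONDITION & SPEC =====
def Spec_check_authentication_required_py (html_content : String) (out : Bool) : Prop := out = check_authentication_required_py_alt html_content
instance (html_content : String) (out : Bool) : Decidable (Spec_check_authentication_required_py html_content out) := by unfold Spec_check_authentication_required_py; infer_instance

-- ===== CLAIM (what is proved, stated in full; the proofs are below) =====
def Claim_equal_check_authentication_required_py : Prop := ∀ (html_content : String), Dom_check_authentication_required_py html_content → Spec_check_authentication_required_py html_content (check_authentication_required_py html_content)

-- ===== LEMMAS AND PROOFS =====

-- B's dict holds exactly the keywords, grouped by their first character.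
theorem mem_getD_pvByFirst (kw : String) (c : Char) :
    kw ∈ pvByFirst.getD c [] ↔ kw ∈ pvAuthKeywords ∧ kw.toList.headD ' ' = c := by
  have hd : pvByFirst = PySem.Dict.mk
    [('l', ["login", "login required"]), ('s', ["signin"]),
     ('a', ["authentication", "access denied"]), ('u', ["unauthorized"]),
     ('p', ["please log in"])] := by decide
  rw [hd]
  simp only [PySem.Dict.getD_eq_get?_getD, PySem.Dict.get?_mk_cons, pvAuthKeywords,
    beq_iff_eq, List.mem_cons, List.not_mem_nil, or_false]
  split_ifs with h1 h2 h3 h4 h5 <;> try subst_vars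
  · constructor
    · rintro h; simp only [Option.getD_some, List.mem_cons, List.not_mem_nil, or_false] at h
      rcases h with rfl | rfl <;> exact ⟨by decide, by decide⟩
    · rintro ⟨(rfl|rfl|rfl|rfl|rfl|rfl|rfl), hh⟩ <;> revert hh <;> decide
  · constructor
    · rintro h; simp only [Option.getD_some, List.mem_cons, List.not_mem_nil, or_false] at h
      rcases h with rfl; exact ⟨by decide, by decide⟩
    · rintro ⟨(rfl|rfl|rfl|rfl|rfl|rfl|rfl), hh⟩ <;> revert hh <;> decide
  · constructor
    · rintro h; simp only [Option.getD_some, List.mem_cons, List.not_mem_nil, or_false] at h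
      rcases h with rfl | rfl <;> exact ⟨by decide, by decide⟩
    · rintro ⟨(rfl|rfl|rfl|rfl|rfl|rfl|rfl), hh⟩ <;> revert hh <;> decide
  · constructor
    · rintro h; simp only [Option.getD_some, List.mem_cons, List.not_mem_nil, or_false] at h
      rcases h with rfl; exact ⟨by decide, by decide⟩
    · rintro ⟨(rfl|rfl|rfl|rfl|rfl|rfl|rfl), hh⟩ <;> revert hh <;> decide
  · constructor
    · rintro h; simp only [Option.getD_some, List.mem_cons, List.not_mem_nil, or_false] at h
      rcases h with rfl; exact ⟨by decide, by decide⟩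
    · rintro ⟨(rfl|rfl|rfl|rfl|rfl|rfl|rfl), hh⟩ <;> revert hh <;> decide
  · constructor
    · rintro h; simp [PySem.Dict.get?] at h
    · rintro ⟨(rfl|rfl|rfl|rfl|rfl|rfl|rfl), hh⟩ <;> simp_all

-- B's scan finds a match iff some keyword is an infix of the scanned text.
theorem pvScan_eq_true_iff (l : List Char) :
    pvScan pvByFirst l = true ↔ ∃ kw ∈ pvAuthKeywords, kw.toList <:+: l := by
  induction l with
  | nil =>
    simp only [pvScan, Bool.false_eq_true, false_iff]
    rintro ⟨kw, hkw, hinf⟩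
    rw [List.infix_nil] at hinf
    simp only [pvAuthKeywords, List.mem_cons, List.not_mem_nil, or_false] at hkw
    revert hinf
    rcases hkw with rfl|rfl|rfl|rfl|rfl|rfl|rfl <;> decide
  | cons c rest ih =>
    simp only [pvScan, Bool.or_eq_true, List.any_eq_true, ih]
    constructor
    · rintro (⟨kw, hmem, hsw⟩ | ⟨kw, hmem, hinf⟩)
      · exact ⟨kw, (mem_getD_pvByFirst kw c).1 hmem |>.1,
          ((PySem.Chars.startswith_iff _ _).1 hsw).isInfix⟩
      · exact ⟨kw, hmem, hinf.trans (List.suffix_cons c rest).isInfix⟩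
    · rintro ⟨kw, hmem, hinf⟩
      rcases List.infix_cons_iff.1 hinf with hpre | hinf'
      · left
        have hne : kw.toList ≠ [] := by
          simp only [pvAuthKeywords, List.mem_cons, List.not_mem_nil, or_false] at hmem
          rcases hmem with rfl|rfl|rfl|rfl|rfl|rfl|rfl <;> decide
        have hhead : kw.toList.headD ' ' = c := by
          rcases hk : kw.toList with _ | ⟨d, tl⟩
          · exact absurd hk hne
          · rw [hk] at hpre
            rcases List.cons_prefix_cons.1 hpre with ⟨rfl, -⟩
            simp
        exact ⟨kw, (mem_getD_pvByFirst kw c).2 ⟨hmem, hhead⟩,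
          (PySem.Chars.startswith_iff _ _).2 hpre⟩
      · exact Or.inr ⟨kw, hmem, hinf'⟩

-- ===== VERDICT (by name: the statement is the Claim_ definition above) =====
theorem check_authentication_required_py_spec : Claim_equal_check_authentication_required_py := by
  intro s _
  unfold Spec_check_authentication_required_py
  unfold check_authentication_required_py check_authentication_required_py_alt
  rw [Bool.eq_iff_iff]
  simp only [List.any_eq_true, PySem.Str.isIn_iff_infix, PySem.Str.toList_lower,
    pvScan_eq_true_iff, pvAuthKeywords]
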